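-- pv_equiv track=rewrite | github.com/FabianSandi/portafolio1 | tiene cero.py | tieneceroaux
-- ===== SOURCE A (Python) =====
-- def tieneceroaux(num):
--     if num==0:
--         return False
--     else:
--         if (num%10)==0:
--             return True
--         else:
--             return tieneceroaux(num//10)
-- ===== SOURCE B (Python) =====
-- def tieneceroaux(num):
--     digs = []
--     n = num
--     while n > 0:
--         digs.append(n % 10)
--         n //= 10
--     return 0 in digs
-- ===== Notes on version B (the rewrite author's own statement) =====
-- stated objective: alternative
-- what changed: A's tail recursion with early return is replaced by two staged passes: a loop that materializes the full digit list of num, followed by a membership test 0 in digs; num == 0 yields the empty list and hence False like A.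
-- outside the precondition, e.g. on tieneceroaux(-9394): A returns True, B returns False; on tieneceroaux(-1): A raises RecursionError, B returns False
import Mathlib
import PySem

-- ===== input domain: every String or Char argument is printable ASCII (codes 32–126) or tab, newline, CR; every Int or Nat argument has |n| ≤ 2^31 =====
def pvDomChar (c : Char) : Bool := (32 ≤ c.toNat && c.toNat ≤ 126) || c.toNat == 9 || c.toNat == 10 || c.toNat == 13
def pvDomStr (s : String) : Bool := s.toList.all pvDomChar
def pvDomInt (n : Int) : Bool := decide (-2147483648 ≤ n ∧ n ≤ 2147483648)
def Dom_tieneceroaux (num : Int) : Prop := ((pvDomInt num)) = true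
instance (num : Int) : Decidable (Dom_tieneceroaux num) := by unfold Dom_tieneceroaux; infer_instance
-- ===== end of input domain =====

-- B replaces A's tail recursion with early return by two staged passes: first materialize the
-- digit list of num, then test 0-membership on it (objective: alternative; return value only).

-- ===== PORT A =====
-- A recurses on num//10; for num < 0 the Python recursion never reaches 0 (RecursionError),
-- so the port carries fuel: 40 > the digit count of any |num| ≤ 2^31, hence exact on Pre_.
def tcA : Nat → Int → Bool
  | 0, _ => false
  | fuel + 1, num =>
    if num = 0 then false
    else if PySem.Int.mod num 10 = 0 then true
    else tcA fuel (PySem.Int.floordiv num 10)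

def tieneceroaux (num : Int) : Bool := tcA 40 num

-- ===== PORT B =====
-- the digit-collecting while loop of Source B, state (n, digs); fuel 40 bounds it the same way.
def tcDigs : Nat → Int → List Int → List Int
  | 0, _, digs => digs
  | fuel + 1, n, digs =>
    if 0 < n then tcDigs fuel (PySem.Int.floordiv n 10) (digs ++ [PySem.Int.mod n 10])
    else digs

def tieneceroaux_alt (num : Int) : Bool := (tcDigs 40 num []).contains 0

-- ===== PRECONDITION & SPEC =====
-- Pre_ excludes num < 0: there Python A either raises RecursionError (num//10 is stuck at -1, e.g. num = -1)
-- or returns True by scanning floor-division's negative-digit representation (e.g. -9394 → -940 → True),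
-- an artefact no caller would specify; B naturally treats negatives as having no digits and returns False.
def Pre_tieneceroaux (num : Int) : Prop := 0 ≤ num
instance (num : Int) : Decidable (Pre_tieneceroaux num) := by unfold Pre_tieneceroaux; infer_instance
def pvWitness_tieneceroaux : Int := (105)

def Spec_tieneceroaux (num : Int) (out : Bool) : Prop := out = tieneceroaux_alt num
instance (num : Int) (out : Bool) : Decidable (Spec_tieneceroaux num out) := by unfold Spec_tieneceroaux; infer_instance

-- ===== CLAIM (what is proved, stated in full; the proofs are below) =====
def Claim_equal_tieneceroaux : Prop := ∀ (num : Int), Dom_tieneceroaux num → Pre_tieneceroaux num → Spec_tieneceroaux num (tieneceroaux num)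

-- ===== LEMMAS AND PROOFS =====

-- reference: "n has a zero decimal digit", on Nat
def hz (n : Nat) : Bool :=
  if n = 0 then false
  else if n % 10 = 0 then true
  else hz (n / 10)
termination_by n
decreasing_by exact Nat.div_lt_self (Nat.pos_of_ne_zero (by assumption)) (by norm_num)

theorem cast_ten : ((10 : Nat) : Int) = (10 : Int) := by norm_num

theorem tcA_eq_hz : ∀ (f n : Nat), n < 10 ^ f → tcA f (n : Int) = hz n := by
  intro f
  induction f with
  | zero =>
    intro n h
    norm_num at h
    subst h
    simp [tcA, hz]
  | succ f ih =>
    intro n h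
    rcases Nat.eq_zero_or_pos n with h0 | h0
    · subst h0; simp [tcA, hz]
    · have hne : (n : Int) ≠ 0 := by exact_mod_cast h0.ne'
      rw [hz, if_neg h0.ne']
      simp only [tcA, if_neg hne]
      rw [← cast_ten, PySem.Int.mod_natCast, PySem.Int.floordiv_natCast]
      have hlt : n / 10 < 10 ^ f := by
        rw [Nat.div_lt_iff_lt_mul (by norm_num)]
        calc n < 10 ^ (f + 1) := h
          _ = 10 ^ f * 10 := by ring
      by_cases hm : n % 10 = 0
      · rw [if_pos hm]
        have : ((n % 10 : Nat) : Int) = 0 := by exact_mod_cast hm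
        rw [if_pos this]
      · rw [if_neg hm]
        have : ((n % 10 : Nat) : Int) ≠ 0 := by exact_mod_cast hm
        rw [if_neg this]
        exact ih _ hlt

theorem tcDigs_contains : ∀ (f n : Nat) (digs : List Int), n < 10 ^ f →
    (tcDigs f (n : Int) digs).contains 0 = (digs.contains 0 || hz n) := by
  intro f
  induction f with
  | zero =>
    intro n digs h
    norm_num at h
    subst h
    simp [tcDigs, hz]
  | succ f ih =>
    intro n digs h
    rcases Nat.eq_zero_or_pos n with h0 | h0
    · subst h0; simp [tcDigs, hz]
    · have hpos : (0 : Int) < (n : Int) := by exact_mod_cast h0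
      simp only [tcDigs, if_pos hpos]
      rw [← cast_ten, PySem.Int.mod_natCast, PySem.Int.floordiv_natCast]
      have hlt : n / 10 < 10 ^ f := by
        rw [Nat.div_lt_iff_lt_mul (by norm_num)]
        calc n < 10 ^ (f + 1) := h
          _ = 10 ^ f * 10 := by ring
      rw [ih _ _ hlt]
      conv_rhs => rw [hz]
      rw [if_neg h0.ne']
      by_cases hm : n % 10 = 0
      · simp [hm]
      · have hc2 : (0 : Int) ≠ (n : Int) % 10 := by omega
        simp [hm, hc2]

-- ===== VERDICT (by name: the statement is the Claim_ definition above) =====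
theorem tieneceroaux_spec : Claim_equal_tieneceroaux := by
  intro num hdom hpre
  unfold Spec_tieneceroaux tieneceroaux tieneceroaux_alt
  unfold Dom_tieneceroaux pvDomInt at hdom
  unfold Pre_tieneceroaux at hpre
  simp only [decide_eq_true_eq] at hdom
  set n := num.toNat with hn
  have hnum : (n : Int) = num := Int.toNat_of_nonneg hpre
  have hbound : n < 10 ^ 40 := lt_of_le_of_lt (show n ≤ 2147483648 by omega) (by norm_num)
  rw [← hnum, tcA_eq_hz 40 n hbound, tcDigs_contains 40 n [] hbound]
  simp
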